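-- pv_equiv track=rewrite | github.com/DaniilPivovarov1/algorithms_and_data_structures | lesson_4/task-2.py | ith_simple_number_with
-- ===== SOURCE A (Python) =====
-- def ith_simple_number_with(n, y):
--     a = [0] * n
--     for i in range(n):
--         a[i] = i
--
--     a[1] = 0
--
--     m = 2
--     while m < n:
--         if a[m] != 0:
--             j = m * 2
--             while j < n:
--                 a[j] = 0
--                 j = j + m
--         m += 1
--
--     b = []
--     for i in a:
--         if a[i] != 0:
--             b.append(a[i])
--     return b[y - 1]
-- ===== SOURCE B (Python) =====
-- def ith_simple_number_with(n, y):
--     primes = []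
--     for k in range(2, n):
--         is_prime = True
--         for p in primes:
--             if p * p > k:
--                 break
--             if k % p == 0:
--                 is_prime = False
--                 break
--         if is_prime:
--             primes.append(k)
--     return primes[y - 1]
-- ===== Notes on version B (the rewrite author's own statement) =====
-- stated objective: alternative
-- what changed: Replaces the Eratosthenes sieve over a mutable array (plus the value-as-index collection pass) with a single pass that tests each candidate by trial division against the already-collected primes up to its square root, appending primes to a plain list; Pre_ excludes exactly the inputs where A raises IndexError (n < 2, or y - 1 outside the index range of the list of primes below n, negative indices included).
import Mathlib
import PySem

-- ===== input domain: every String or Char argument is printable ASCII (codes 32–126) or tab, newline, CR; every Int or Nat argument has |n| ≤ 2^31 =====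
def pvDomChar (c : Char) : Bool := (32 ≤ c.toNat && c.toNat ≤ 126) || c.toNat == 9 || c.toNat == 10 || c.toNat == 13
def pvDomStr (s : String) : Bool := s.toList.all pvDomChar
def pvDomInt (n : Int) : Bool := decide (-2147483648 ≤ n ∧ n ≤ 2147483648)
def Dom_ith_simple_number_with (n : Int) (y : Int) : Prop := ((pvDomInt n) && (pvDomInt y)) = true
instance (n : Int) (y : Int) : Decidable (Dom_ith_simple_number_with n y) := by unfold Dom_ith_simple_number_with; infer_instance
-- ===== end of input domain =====

-- B replaces A's Eratosthenes sieve (mutable array + value-as-index collection pass) with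
-- one pass of trial division appending primes to a plain list; same result, not faster.


-- ===== PORT A =====
-- Python's mutable list is ported as Array (O(1) index/assign like Python); pvSet/pvGet are
-- a[i] = v and a[i], exact for the nonnegative in-range indices this program uses.
def pvSet (a : Array Int) (i v : Int) : Array Int := a.setIfInBounds i.toNat v

def pvGet (a : Array Int) (i : Int) : Int := a.getD i.toNat 0

-- inner 'while j < n: a[j] = 0; j = j + m' (fuel-bounded; fuel n.toNat always suffices since m ≥ 2)
def pvZero (n m : Int) : Nat → Int → Array Int → Array Int
  | 0, _, a => a
  | fuel+1, j, a => if j < n then pvZero n m fuel (j + m) (pvSet a j 0) else a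

-- outer 'while m < n: if a[m] != 0: …; m += 1' (fuel-bounded; fuel n.toNat always suffices)
def pvSieve (n : Int) : Nat → Int → Array Int → Array Int
  | 0, _, a => a
  | fuel+1, m, a =>
    if m < n then
      pvSieve n fuel (m + 1) (if pvGet a m ≠ 0 then pvZero n m n.toNat (m * 2) a else a)
    else a

def ith_simple_number_with (n : Int) (y : Int) : Int :=
  -- a = [0] * n ; for i in range(n): a[i] = i
  let a0 : Array Int := Array.replicate n.toNat 0
  let a1 := (PySem.List.pyRange 0 n 1).foldl (fun acc i => pvSet acc i i) a0
  -- a[1] = 0  (raises in Python when n < 2: excluded by Pre_)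
  let a2 := pvSet a1 1 0
  let a3 := pvSieve n n.toNat 2 a2
  -- b = []; for i in a: if a[i] != 0: b.append(a[i])   (a[i] always in range here)
  let b := a3.foldl (fun b i => if pvGet a3 i ≠ 0 then b.push (pvGet a3 i) else b) (#[] : Array Int)
  -- return b[y - 1]  (IndexError outside Pre_)
  PySem.List.pyGetD b.toList (y - 1) 0

-- ===== PORT B =====
-- 'for p in primes: if p * p > k: break; if k % p == 0: is_prime = False; break' over the
-- already-collected primes (an empty or exhausted list leaves is_prime = True)
def pvTrialP (k : Int) : List Int → Bool
  | [] => true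
  | p :: ps => if p * p > k then true else if PySem.Int.mod k p = 0 then false else pvTrialP k ps

def ith_simple_number_with_alt (n : Int) (y : Int) : Int :=
  let primes := (PySem.List.pyRange 2 n 1).foldl
    (fun ps k => if pvTrialP k ps then ps ++ [k] else ps) ([] : List Int)
  PySem.List.pyGetD primes (y - 1) 0

-- ===== PRECONDITION & SPEC =====
-- 'there are at least k primes i with i < n': counts primes from 2 upward, stopping as soon as
-- k of them are found or n is reached (exact; spec-level, uses Mathlib's Nat.Prime)
def pvAtLeastPrimes (n : Nat) (k : Nat) (i : Nat) : Bool :=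
  if _h : i < n then
    if k = 0 then true
    else pvAtLeastPrimes n (if Nat.Prime i then k - 1 else k) (i + 1)
  else k = 0
termination_by n - i

-- decides 'k ≤ number of primes below n', exactly; the two inequality branches are standard
-- true prime-counting bounds (π(n) ≥ n / bitlength n and π(n) ≤ 48n/210 + 5) used ONLY to
-- answer quickly on large inputs — they never change the decided value
def pvPrimesBelowAtLeast (n : Int) (k : Int) : Bool :=
  if k ≤ 0 then true
  else if n ≤ 2 then false
  else if k ≤ PySem.Int.floordiv n (PySem.Int.bitLength n) then true
  else if 48 * n + 1050 < 210 * k then false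
  else pvAtLeastPrimes n.toNat k.toNat 2

-- Pre_ excludes exactly the inputs where the Python A raises IndexError: n < 2 (a[1] = 0 raises)
-- and y - 1 outside the index range of the list of primes below n (Python negative indexing:
-- valid indices are -(count) ≤ y - 1 < count, i.e. max y (1 - y) ≤ count of primes below n).
def Pre_ith_simple_number_with (n : Int) (y : Int) : Prop :=
  2 ≤ n ∧ pvPrimesBelowAtLeast n (max y (1 - y)) = true
instance (n : Int) (y : Int) : Decidable (Pre_ith_simple_number_with n y) := by
  unfold Pre_ith_simple_number_with; infer_instance

def pvWitness_ith_simple_number_with : Int × Int := (10, 2)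

def Spec_ith_simple_number_with (n : Int) (y : Int) (out : Int) : Prop := out = ith_simple_number_with_alt n y
instance (n : Int) (y : Int) (out : Int) : Decidable (Spec_ith_simple_number_with n y out) := by unfold Spec_ith_simple_number_with; infer_instance

-- ===== CLAIM (what is proved, stated in full; the proofs are below) =====
def Claim_equal_ith_simple_number_with : Prop := ∀ (n : Int) (y : Int), Dom_ith_simple_number_with n y → Pre_ith_simple_number_with n y → Spec_ith_simple_number_with n y (ith_simple_number_with n y)

-- ===== LEMMAS AND PROOFS =====

-- the sieve array after outer passes m = 2 .. M-1: index i holds 0 if i < 2 or i has a proper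
-- prime divisor < M, and i itself otherwise
def fVal (M i : Nat) : Int :=
  if i < 2 ∨ ∃ p < M, Nat.Prime p ∧ p ∣ i ∧ p ≠ i then 0 else (i : Int)

-- list-level replicas of the array loops (proof-side only), plus toList bridges
def pvZeroL (n m : Int) : Nat → Int → List Int → List Int
  | 0, _, a => a
  | fuel+1, j, a => if j < n then pvZeroL n m fuel (j + m) (PySem.List.pySetD a j 0) else a

def pvSieveL (n : Int) : Nat → Int → List Int → List Int
  | 0, _, a => a
  | fuel+1, m, a =>
    if m < n then
      pvSieveL n fuel (m + 1)
        (if PySem.List.pyGetD a m 0 ≠ 0 then pvZeroL n m n.toNat (m * 2) a else a)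
    else a

lemma getD_toList (a : Array Int) (i : Nat) (d : Int) : a.getD i d = a.toList.getD i d := by
  rw [Array.getD, List.getD]
  split
  · rename_i h
    rw [List.getElem?_eq_getElem (by simpa using h)]
    simp
  · rename_i h
    rw [List.getElem?_eq_none (by simpa using Nat.le_of_not_lt h)]
    rfl

lemma pvSet_toList (a : Array Int) (i v : Int) (h : 0 ≤ i) :
    (pvSet a i v).toList = PySem.List.pySetD a.toList i v := by
  rw [pvSet, Array.toList_setIfInBounds, PySem.List.pySetD_of_nonneg _ _ h]

lemma pvGet_toList (a : Array Int) (i : Int) (h : 0 ≤ i) :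
    pvGet a i = PySem.List.pyGetD a.toList i 0 := by
  rw [pvGet, getD_toList, PySem.List.pyGetD_of_nonneg _ _ h]

lemma pvZero_toList (n m : Int) (hm : 0 ≤ m) : ∀ (fuel : Nat) (j : Int) (a : Array Int), 0 ≤ j →
    (pvZero n m fuel j a).toList = pvZeroL n m fuel j a.toList := by
  intro fuel
  induction fuel with
  | zero => intro j a hj; rfl
  | succ fuel ih =>
    intro j a hj
    rw [show pvZero n m (fuel + 1) j a
        = (if j < n then pvZero n m fuel (j + m) (pvSet a j 0) else a) from rfl,
      show pvZeroL n m (fuel + 1) j a.toList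
        = (if j < n then pvZeroL n m fuel (j + m) (PySem.List.pySetD a.toList j 0) else a.toList)
      from rfl]
    split
    · rw [ih (j + m) _ (by omega), pvSet_toList a j 0 hj]
    · rfl

lemma pvSieve_toList (n : Int) : ∀ (fuel : Nat) (M : Int) (a : Array Int), 0 ≤ M →
    (pvSieve n fuel M a).toList = pvSieveL n fuel M a.toList := by
  intro fuel
  induction fuel with
  | zero => intro M a hM; rfl
  | succ fuel ih =>
    intro M a hM
    rw [show pvSieve n (fuel + 1) M a
        = (if M < n then
            pvSieve n fuel (M + 1) (if pvGet a M ≠ 0 then pvZero n M n.toNat (M * 2) a else a)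
          else a) from rfl,
      show pvSieveL n (fuel + 1) M a.toList
        = (if M < n then
            pvSieveL n fuel (M + 1)
              (if PySem.List.pyGetD a.toList M 0 ≠ 0 then pvZeroL n M n.toNat (M * 2) a.toList
               else a.toList)
          else a.toList) from rfl]
    split
    · rw [ih (M + 1) _ (by omega), pvGet_toList a M hM]
      congr 1
      split
      · exact pvZero_toList n M hM n.toNat (M * 2) a (by omega)
      · rfl
    · rfl

lemma foldl_pushA_toList (a3 : Array Int) : ∀ (l : List Int) (acc : Array Int),
    (l.foldl (fun b i => if pvGet a3 i ≠ 0 then b.push (pvGet a3 i) else b) acc).toList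
      = l.foldl (fun b i => if pvGet a3 i ≠ 0 then b ++ [pvGet a3 i] else b) acc.toList := by
  intro l
  induction l with
  | nil => intro acc; rfl
  | cons x l ih =>
    intro acc
    rw [List.foldl_cons, List.foldl_cons, ih]
    split
    · rw [Array.toList_push]
    · rfl

lemma fVal_nonneg (M i : Nat) : 0 ≤ fVal M i := by
  unfold fVal
  split
  · exact le_refl 0
  · positivity

lemma fVal_stable {M N i : Nat} (hi : i < N) (hNM : N ≤ M) : fVal M i = fVal N i := by
  unfold fVal
  congr 1
  simp only [eq_iff_iff]
  constructor
  · rintro (h | ⟨p, hpM, hp, hpd, hpne⟩)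
    · exact Or.inl h
    · by_cases h2 : i < 2
      · exact Or.inl h2
      · refine Or.inr ⟨p, ?_, hp, hpd, hpne⟩
        have : p ≤ i := Nat.le_of_dvd (by omega) hpd
        omega
  · rintro (h | ⟨p, hpN, hp, hpd, hpne⟩)
    · exact Or.inl h
    · exact Or.inr ⟨p, by omega, hp, hpd, hpne⟩

lemma fVal_self {M : Nat} (h2 : 2 ≤ M) : fVal M M ≠ 0 ↔ Nat.Prime M := by
  unfold fVal
  constructor
  · intro h
    split_ifs at h with hc
    · exact absurd rfl h
    · push Not at hc
      obtain ⟨-, hc⟩ := hc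
      by_contra hnp
      have hmf := Nat.minFac_prime (show M ≠ 1 by omega)
      have hdvd := Nat.minFac_dvd M
      have hne : M.minFac ≠ M := by
        intro he; exact hnp (he ▸ hmf)
      have : M.minFac < M := lt_of_le_of_ne (Nat.le_of_dvd (by omega) hdvd) hne
      exact hne (hc M.minFac this hmf hdvd)
  · intro hp
    rw [if_neg]
    · simp; omega
    · push Not
      refine ⟨by omega, fun p _ hpp hpd => ?_⟩
      rcases (Nat.Prime.eq_one_or_self_of_dvd hp p hpd) with h | h
      · exact absurd h hpp.ne_one
      · simp [h]

lemma fVal_succ_prime {M i : Nat} (hp : Nat.Prime M) :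
    fVal (M + 1) i = if 2 * M ≤ i ∧ M ∣ i then 0 else fVal M i := by
  have hM2 := hp.two_le
  unfold fVal
  by_cases hz : 2 * M ≤ i ∧ M ∣ i
  · rw [if_pos hz, if_pos]
    exact Or.inr ⟨M, by omega, hp, hz.2, by omega⟩
  · rw [if_neg hz]
    congr 1
    simp only [eq_iff_iff]
    constructor
    · rintro (h | ⟨p, hpM, hpp, hpd, hpne⟩)
      · exact Or.inl h
      · rcases Nat.lt_succ_iff_lt_or_eq.mp hpM with h' | h'
        · exact Or.inr ⟨p, h', hpp, hpd, hpne⟩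
        · subst h'
          obtain ⟨t, ht⟩ := hpd
          rcases Nat.lt_or_ge t 2 with h1 | h1
          · interval_cases t
            · left; omega
            · omega
          · exact absurd ⟨by nlinarith, ⟨t, ht⟩⟩ hz
    · rintro (h | ⟨p, hpM, hpp, hpd, hpne⟩)
      · exact Or.inl h
      · exact Or.inr ⟨p, by omega, hpp, hpd, hpne⟩

lemma fVal_succ_not_prime {M i : Nat} (hp : ¬ Nat.Prime M) : fVal (M + 1) i = fVal M i := by
  unfold fVal
  congr 1
  simp only [eq_iff_iff]
  constructor
  · rintro (h | ⟨p, hpM, hpp, hpd, hpne⟩)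
    · exact Or.inl h
    · rcases Nat.lt_succ_iff_lt_or_eq.mp hpM with h' | h'
      · exact Or.inr ⟨p, h', hpp, hpd, hpne⟩
      · subst h'; exact absurd hpp hp
  · rintro (h | ⟨p, hpM, hpp, hpd, hpne⟩)
    · exact Or.inl h
    · exact Or.inr ⟨p, by omega, hpp, hpd, hpne⟩

lemma fVal_ne_zero_iff {N i : Nat} (hi : i < N) : fVal N i ≠ 0 ↔ Nat.Prime i := by
  by_cases h2 : 2 ≤ i
  · rw [fVal_stable (Nat.lt_succ_self i) hi]
    have he : fVal (i + 1) i = fVal i i := by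
      unfold fVal
      congr 1
      simp only [eq_iff_iff]
      constructor
      · rintro (h | ⟨p, hpM, hpp, hpd, hpne⟩)
        · exact Or.inl h
        · rcases Nat.lt_succ_iff_lt_or_eq.mp hpM with h' | h'
          · exact Or.inr ⟨p, h', hpp, hpd, hpne⟩
          · exact absurd h' hpne
      · rintro (h | ⟨p, hpM, hpp, hpd, hpne⟩)
        · exact Or.inl h
        · exact Or.inr ⟨p, by omega, hpp, hpd, hpne⟩
    rw [he, fVal_self h2]
  · interval_cases i <;> simp [fVal] <;> decide

lemma pvZeroL_length (n m : Int) : ∀ (fuel : Nat) (j : Int) (a : List Int),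
    (pvZeroL n m fuel j a).length = a.length := by
  intro fuel
  induction fuel with
  | zero => intro j a; rfl
  | succ fuel ih =>
    intro j a
    unfold pvZeroL
    split
    · rw [ih, PySem.List.length_pySetD]
    · rfl

lemma pvZeroL_get (n m : Int) (hm : 0 < m) :
    ∀ (fuel : Nat) (j : Int) (a : List Int), 0 ≤ j → a.length = n.toNat →
      n ≤ j + fuel * m →
      ∀ i : Nat, i < n.toNat →
        (pvZeroL n m fuel j a)[i]? =
          if j ≤ (i : Int) ∧ m ∣ ((i : Int) - j) then some 0 else a[i]? := by
  intro fuel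
  induction fuel with
  | zero =>
    intro j a hj hlen hfu i hi
    rw [if_neg]
    · rfl
    · rintro ⟨hji, -⟩
      simp at hfu
      omega
  | succ fuel ih =>
    intro j a hj hlen hfu i hi
    unfold pvZeroL
    split
    case isTrue hjn =>
      have hset : PySem.List.pySetD a j 0 = a.set j.toNat 0 :=
        PySem.List.pySetD_of_nonneg a 0 hj
      have hfu' : n ≤ (j + m) + fuel * m := by
        have : ((fuel : Int) + 1) * m = fuel * m + m := by ring
        push_cast at hfu ⊢
        omega
      rw [ih (j + m) _ (by omega) (by rw [hset, List.length_set]; exact hlen) hfu' i hi]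
      rw [hset]
      by_cases hij : (i : Int) = j
      · rw [if_neg (by omega), if_pos ⟨by omega, by simp [← hij]⟩]
        have : i = j.toNat := by omega
        rw [this, List.getElem?_set_self (by omega)]
      · have hiff : ((j + m ≤ (i : Int) ∧ m ∣ (i : Int) - (j + m))) ↔
            (j ≤ (i : Int) ∧ m ∣ (i : Int) - j) := by
          constructor
          · rintro ⟨h1, t, ht⟩
            exact ⟨by omega, t + 1, by linarith [ht]⟩
          · rintro ⟨h1, t, ht⟩
            have ht1 : 1 ≤ t := by
              by_contra hlt
              have : m * t ≤ 0 := mul_nonpos_of_nonneg_of_nonpos hm.le (by omega)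
              omega
            have hmt : m ≤ m * t := le_mul_of_one_le_right hm.le ht1
            exact ⟨by omega, t - 1, by linarith [ht]⟩
        rw [List.getElem?_set_ne (by omega)]
        by_cases hc : j ≤ (i : Int) ∧ m ∣ (i : Int) - j
        · rw [if_pos (hiff.mpr hc), if_pos hc]
        · rw [if_neg (fun h => hc (hiff.mp h)), if_neg hc]
    case isFalse hjn =>
      rw [if_neg]
      rintro ⟨hji, -⟩
      omega

lemma pvSieveL_length (n : Int) : ∀ (fuel : Nat) (M : Int) (a : List Int),
    (pvSieveL n fuel M a).length = a.length := by
  intro fuel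
  induction fuel with
  | zero => intro M a; rfl
  | succ fuel ih =>
    intro M a
    unfold pvSieveL
    split
    · rw [ih]
      split
      · rw [pvZeroL_length]
      · rfl
    · rfl

lemma pvSieveL_get (n : Int) (hn : 2 ≤ n) :
    ∀ (fuel : Nat) (M : Int) (a : List Int), 2 ≤ M → n ≤ M + fuel →
      a.length = n.toNat → (∀ i, i < n.toNat → a[i]? = some (fVal M.toNat i)) →
      ∀ i, i < n.toNat → (pvSieveL n fuel M a)[i]? = some (fVal n.toNat i) := by
  intro fuel
  induction fuel with
  | zero =>
    intro M a hM hfu hlen hget i hi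
    rw [show pvSieveL n 0 M a = a from rfl, hget i hi,
      fVal_stable hi (show n.toNat ≤ M.toNat by simp at hfu; omega)]
  | succ fuel ih =>
    intro M a hM hfu hlen hget i hi
    unfold pvSieveL
    split
    case isFalse hMn =>
      rw [hget i hi, fVal_stable hi (show n.toNat ≤ M.toNat by omega)]
    case isTrue hMn =>
      have hMt : (M + 1).toNat = M.toNat + 1 := by omega
      have hMget : PySem.List.pyGetD a M 0 = fVal M.toNat M.toNat := by
        have h1 : PySem.List.pyGetD a M 0 = a[M.toNat] :=
          PySem.List.pyGetD_eq_getElem a 0 (by omega) (by rw [hlen]; omega)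
        have h2 := hget M.toNat (by omega)
        rw [List.getElem?_eq_getElem (by omega)] at h2
        rw [h1, Option.some_inj.mp h2]
      apply ih (M + 1) _ (by omega) (by push_cast at hfu ⊢; omega)
      · split
        · rw [pvZeroL_length]; exact hlen
        · exact hlen
      · intro i' hi'
        by_cases hp : Nat.Prime M.toNat
        · rw [if_pos (by rw [hMget]; exact (fVal_self (by omega)).mpr hp)]
          have hfuz : n ≤ M * 2 + (n.toNat : Nat) * M := by
            have h1 : (n.toNat : Int) * 1 ≤ (n.toNat : Int) * M :=
              mul_le_mul_of_nonneg_left (by omega) (by omega)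
            omega
          rw [pvZeroL_get n M (by omega) n.toNat (M * 2) a (by omega) hlen (by exact_mod_cast hfuz) i' hi']
          have hMeq : ((M.toNat : Int)) = M := Int.toNat_of_nonneg (by omega)
          have hdvd : (M ∣ (i' : Int) - M * 2) ↔ (M.toNat ∣ i') := by
            constructor
            · intro h
              have h2 : M ∣ (i' : Int) := by
                have := dvd_add h (Dvd.intro 2 rfl)
                simpa using this
              rw [← hMeq] at h2
              exact_mod_cast h2
            · intro h
              have h2 : (M : Int) ∣ (i' : Int) := by
                rw [← hMeq]; exact_mod_cast h
              exact dvd_sub h2 (Dvd.intro 2 rfl)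
          rw [hMt, fVal_succ_prime hp]
          by_cases hc : 2 * M.toNat ≤ i' ∧ M.toNat ∣ i'
          · rw [if_pos ⟨by omega, hdvd.mpr hc.2⟩, if_pos hc]
          · rw [if_neg (fun h => hc ⟨by omega, hdvd.mp h.2⟩), if_neg hc]
            exact hget i' hi'
        · rw [if_neg (show ¬(PySem.List.pyGetD a M 0 ≠ 0) by
            rw [hMget]; intro h; exact hp ((fVal_self (by omega)).mp h))]
          rw [hget i' hi', hMt, fVal_succ_not_prime hp]
      · exact hi

lemma fVal_two (i : Nat) : fVal 2 i = if i < 2 then 0 else (i : Int) := by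
  unfold fVal
  congr 1
  simp only [eq_iff_iff, or_iff_left_iff_imp]
  rintro ⟨p, hp2, hpp, -, -⟩
  interval_cases p
  · exact absurd hpp Nat.not_prime_zero
  · exact absurd hpp Nat.not_prime_one

lemma fVal_eq_self_of_prime {N i : Nat} (hp : Nat.Prime i) : fVal N i = (i : Int) := by
  unfold fVal
  rw [if_neg]
  rintro (h | ⟨p, hpN, hpp, hpd, hpne⟩)
  · exact absurd hp.two_le (by omega)
  · rcases hp.eq_one_or_self_of_dvd p hpd with h' | h'
    · exact absurd h' hpp.ne_one
    · exact hpne h'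

lemma foldl_set_range : ∀ (L : Nat) (xs : List Int), L ≤ xs.length →
    (PySem.List.pyRange 0 (L : Int) 1).foldl (fun acc i => PySem.List.pySetD acc i i) xs
      = (List.range L).map (fun i : Nat => (i : Int)) ++ xs.drop L := by
  intro L
  induction L with
  | zero => intro xs h; simp [PySem.List.pyRange_one_eq_nil]
  | succ L ih =>
    intro xs h
    have hcast : ((L + 1 : Nat) : Int) = (L : Int) + 1 := by push_cast; ring
    rw [hcast, PySem.List.pyRange_one_succ_right (by positivity), List.foldl_append,
      ih xs (by omega)]
    simp only [List.foldl_cons, List.foldl_nil]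
    rw [PySem.List.pySetD_natCast, List.set_append]
    have hlen : ((List.range L).map (fun i : Nat => (i : Int))).length = L := by simp
    rw [if_neg (by omega), hlen, Nat.sub_self,
      List.drop_eq_getElem_cons (by omega : L < xs.length), List.set_cons_zero]
    simp [List.range_succ]

lemma init_eq (n : Int) (hn : 2 ≤ n) :
    PySem.List.pySetD ((PySem.List.pyRange 0 n 1).foldl (fun acc i => PySem.List.pySetD acc i i)
        (List.replicate n.toNat 0)) 1 0
      = (List.range n.toNat).map (fun i => fVal 2 i) := by
  have hn' : ((n.toNat : Nat) : Int) = n := Int.toNat_of_nonneg (by omega)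
  rw [show PySem.List.pyRange 0 n 1 = PySem.List.pyRange 0 ((n.toNat : Nat) : Int) 1 by rw [hn'],
    foldl_set_range n.toNat (List.replicate n.toNat 0) (by simp),
    List.drop_replicate]
  simp only [Nat.sub_self, List.replicate_zero, List.append_nil]
  rw [PySem.List.pySetD_of_nonneg _ _ (by norm_num)]
  apply List.ext_getElem (by simp)
  intro i h1 h2
  rw [List.getElem_set, List.getElem_map, List.getElem_range, List.getElem_map,
    List.getElem_range, fVal_two]
  by_cases hi1 : i = 1
  · rw [if_pos (by omega), if_pos (by omega)]
  · rw [if_neg (by omega)]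
    by_cases hi2 : i < 2
    · rw [if_pos hi2]
      have : i = 0 := by omega
      subst this
      rfl
    · rw [if_neg hi2]

lemma a3_eq (n : Int) (hn : 2 ≤ n) :
    pvSieveL n n.toNat 2 ((List.range n.toNat).map (fun i => fVal 2 i))
      = (List.range n.toNat).map (fun i => fVal n.toNat i) := by
  have hget := pvSieveL_get n hn n.toNat 2 ((List.range n.toNat).map (fun i => fVal 2 i))
    (by norm_num) (by omega) (by simp)
    (by intro i hi
        rw [List.getElem?_map, List.getElem?_range hi]
        rfl)
  apply List.ext_getElem?
  intro i
  by_cases hi : i < n.toNat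
  · rw [hget i hi, List.getElem?_map, List.getElem?_range hi]
    rfl
  · rw [List.getElem?_eq_none, List.getElem?_eq_none (by simp; omega)]
    rw [pvSieveL_length]
    simp
    omega

lemma collect_eq (n : Int) (hn : 2 ≤ n) :
    ((List.range n.toNat).map (fun i => fVal n.toNat i)).foldl
        (fun b i => if PySem.List.pyGetD ((List.range n.toNat).map (fun i => fVal n.toNat i)) i 0 ≠ 0
                    then b ++ [PySem.List.pyGetD ((List.range n.toNat).map (fun i => fVal n.toNat i)) i 0]
                    else b) []
      = ((List.range n.toNat).filter (fun i => decide (Nat.Prime i))).map (fun i : Nat => (i : Int)) := by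
  have hnz : 0 < n.toNat := by omega
  have hgetD : ∀ k : Nat, k < n.toNat →
      PySem.List.pyGetD ((List.range n.toNat).map (fun i => fVal n.toNat i)) (k : Int) 0
        = fVal n.toNat k := by
    intro k hk
    rw [PySem.List.pyGetD_natCast, List.getD_eq_getElem _ _ (by simpa using hk),
      List.getElem_map, List.getElem_range]
  have hstep1 : ∀ (b : List Int), ∀ v ∈ (List.range n.toNat).map (fun i => fVal n.toNat i),
      (if PySem.List.pyGetD ((List.range n.toNat).map (fun i => fVal n.toNat i)) v 0 ≠ 0
       then b ++ [PySem.List.pyGetD ((List.range n.toNat).map (fun i => fVal n.toNat i)) v 0]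
       else b)
        = (if v ≠ 0 then b ++ [v] else b) := by
    intro b v hv
    obtain ⟨i, hi, rfl⟩ := List.mem_map.mp hv
    have hi' : i < n.toNat := List.mem_range.mp hi
    by_cases hz : fVal n.toNat i = 0
    · rw [hz]
      have h00 := hgetD 0 hnz
      norm_num at h00
      rw [h00, if_neg (by simp [fVal]), if_neg (by simp)]
    · have hp : Nat.Prime i := (fVal_ne_zero_iff hi').mp hz
      have hvv : fVal n.toNat i = (i : Int) := fVal_eq_self_of_prime hp
      rw [hvv, hgetD i hi', hvv]
  rw [PySem.List.foldl_congr_mem _ _ (fun b v => if v ≠ 0 then b ++ [v] else b) [] hstep1,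
    PySem.List.foldl_append_ite_eq_filter (fun v : Int => v ≠ 0) _ [], List.nil_append,
    List.filter_map,
    List.filter_congr (q := fun i => decide (Nat.Prime i))
      (by intro i hi
          have hi' : i < n.toNat := List.mem_range.mp hi
          simp only [Function.comp_apply, decide_eq_decide]
          exact fVal_ne_zero_iff hi')]
  apply List.map_congr_left
  intro i hi
  exact fVal_eq_self_of_prime (by simpa using (List.mem_filter.mp hi).2)

lemma pvTrialP_true (k : Int) : ∀ (acc : List Int), (∀ p ∈ acc, p * p ≤ k → ¬ p ∣ k) →
    pvTrialP k acc = true := by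
  intro acc
  induction acc with
  | nil => intro _; rfl
  | cons p ps ih =>
    intro h
    rw [show pvTrialP k (p :: ps)
        = (if p * p > k then true else if PySem.Int.mod k p = 0 then false else pvTrialP k ps)
      from rfl]
    by_cases h1 : p * p > k
    · rw [if_pos h1]
    · rw [if_neg h1]
      have hnd : ¬ p ∣ k := h p List.mem_cons_self (by omega)
      rw [if_neg (fun hm => hnd ((PySem.Int.mod_eq_zero_iff_dvd k p).mp hm))]
      exact ih (fun q hq => h q (List.mem_cons_of_mem p hq))

lemma pvTrialP_false (k : Int) : ∀ (acc : List Int), acc.Pairwise (· < ·) →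
    (∀ p ∈ acc, 0 < p) → ∀ q ∈ acc, q * q ≤ k → q ∣ k → pvTrialP k acc = false := by
  intro acc
  induction acc with
  | nil => intro _ _ q hq; exact absurd hq List.not_mem_nil
  | cons p ps ih =>
    intro hpw hpos q hq hqq hqd
    rw [show pvTrialP k (p :: ps)
        = (if p * p > k then true else if PySem.Int.mod k p = 0 then false else pvTrialP k ps)
      from rfl]
    have hppos : 0 < p := hpos p List.mem_cons_self
    by_cases h1 : p * p > k
    · exfalso
      rcases List.mem_cons.mp hq with rfl | hq'
      · omega
      · have hpq : p < q := (List.pairwise_cons.mp hpw).1 q hq'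
        nlinarith
    · rw [if_neg h1]
      by_cases hm : PySem.Int.mod k p = 0
      · rw [if_pos hm]
      · rw [if_neg hm]
        have hnd : ¬ p ∣ k := fun hd => hm ((PySem.Int.mod_eq_zero_iff_dvd k p).mpr hd)
        have hq'' : q ∈ ps := by
          rcases List.mem_cons.mp hq with rfl | h
          · exact absurd hqd hnd
          · exact h
        exact ih (List.pairwise_cons.mp hpw).2
          (fun x hx => hpos x (List.mem_cons_of_mem p hx)) q hq'' hqq hqd

lemma primesP_pairwise (m : Nat) :
    (((List.range m).filter (fun i => decide (Nat.Prime i))).map (fun i : Nat => (i : Int))).Pairwise (· < ·) := by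
  rw [List.pairwise_map]
  exact ((List.pairwise_lt_range).filter _).imp (by intro a b h; exact_mod_cast h)

lemma primesP_pos (m : Nat) :
    ∀ p ∈ ((List.range m).filter (fun i => decide (Nat.Prime i))).map (fun i : Nat => (i : Int)), 0 < p := by
  intro p hp
  obtain ⟨i, hi, rfl⟩ := List.mem_map.mp hp
  have : Nat.Prime i := by simpa using (List.mem_filter.mp hi).2
  exact_mod_cast this.pos

lemma pvTrialP_iff (k : Int) (hk : 2 ≤ k) :
    pvTrialP k (((List.range k.toNat).filter (fun i => decide (Nat.Prime i))).map (fun i : Nat => (i : Int))) = true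
      ↔ Nat.Prime k.toNat := by
  have hkN : ((k.toNat : Nat) : Int) = k := Int.toNat_of_nonneg (by omega)
  constructor
  · intro h
    by_contra hnp
    have hmp : Nat.Prime k.toNat.minFac := Nat.minFac_prime (by omega)
    have hmd : k.toNat.minFac ∣ k.toNat := Nat.minFac_dvd _
    have hsq : k.toNat.minFac * k.toNat.minFac ≤ k.toNat := by
      have := Nat.minFac_sq_le_self (show 0 < k.toNat by omega) hnp
      nlinarith [this]
    have hmlt : k.toNat.minFac < k.toNat :=
      lt_of_le_of_ne (Nat.le_of_dvd (by omega) hmd)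
        (fun he => hnp (by rw [Nat.prime_def_minFac]; exact ⟨by omega, he⟩))
    have hmem : ((k.toNat.minFac : Nat) : Int)
        ∈ ((List.range k.toNat).filter (fun i => decide (Nat.Prime i))).map (fun i : Nat => (i : Int)) :=
      List.mem_map.mpr ⟨k.toNat.minFac,
        List.mem_filter.mpr ⟨List.mem_range.mpr hmlt, by simpa using hmp⟩, rfl⟩
    have hf := pvTrialP_false k _ (primesP_pairwise k.toNat) (primesP_pos k.toNat)
      ((k.toNat.minFac : Nat) : Int) hmem
      (by rw [← hkN]; exact_mod_cast hsq)
      (by rw [← hkN]; exact_mod_cast hmd)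
    rw [h] at hf
    exact absurd hf (by simp)
  · intro hp
    apply pvTrialP_true
    intro p hmem _ hdvd
    obtain ⟨i, hi, rfl⟩ := List.mem_map.mp hmem
    obtain ⟨hir, hipr⟩ := List.mem_filter.mp hi
    have hilt : i < k.toNat := List.mem_range.mp hir
    have hipr' : Nat.Prime i := by simpa using hipr
    have hid : i ∣ k.toNat := by
      rw [← Int.natCast_dvd_natCast, hkN]
      exact hdvd
    rcases hp.eq_one_or_self_of_dvd i hid with h1 | h1
    · exact hipr'.ne_one h1
    · omega

lemma pvFoldB (m : Nat) (hm : 2 ≤ m) :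
    (PySem.List.pyRange 2 (m : Int) 1).foldl (fun ps k => if pvTrialP k ps then ps ++ [k] else ps) []
      = ((List.range m).filter (fun i => decide (Nat.Prime i))).map (fun i : Nat => (i : Int)) := by
  induction m, hm using Nat.le_induction with
  | base =>
    rw [show ((2 : Nat) : Int) = 2 by norm_num, PySem.List.pyRange_one_eq_nil (by norm_num)]
    decide
  | succ m hm ih =>
    have hcast : ((m + 1 : Nat) : Int) = (m : Int) + 1 := by push_cast; ring
    rw [hcast, PySem.List.pyRange_one_succ_right (by exact_mod_cast hm), List.foldl_append, ih]
    simp only [List.foldl_cons, List.foldl_nil]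
    have hmN : ((m : Int)).toNat = m := Int.toNat_natCast m
    have hiff := pvTrialP_iff (m : Int) (by exact_mod_cast hm)
    rw [hmN] at hiff
    rw [List.range_succ, List.filter_append, List.map_append]
    by_cases hp : Nat.Prime m
    · rw [if_pos (hiff.mpr hp)]
      simp [hp]
    · rw [if_neg (by
        intro h
        exact hp (hiff.mp h))]
      simp [hp]

lemma primesB_eq (n : Int) (hn : 2 ≤ n) :
    (PySem.List.pyRange 2 n 1).foldl (fun ps k => if pvTrialP k ps then ps ++ [k] else ps) []
      = ((List.range n.toNat).filter (fun i => decide (Nat.Prime i))).map (fun i : Nat => (i : Int)) := by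
  have hn' : ((n.toNat : Nat) : Int) = n := Int.toNat_of_nonneg (by omega)
  rw [← hn']
  exact pvFoldB n.toNat (by omega)

-- ===== VERDICT (by name: the statement is the Claim_ definition above) =====
theorem ith_simple_number_with_spec : Claim_equal_ith_simple_number_with := by
  intro n y _ hPre
  have hn : 2 ≤ n := hPre.1
  unfold Spec_ith_simple_number_with ith_simple_number_with ith_simple_number_with_alt
  dsimp only
  -- A side: move everything to the list world
  have hA3 : (pvSieve n n.toNat 2
        (pvSet ((PySem.List.pyRange 0 n 1).foldl (fun acc i => pvSet acc i i)
          (Array.replicate n.toNat 0)) 1 0)).toList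
      = (List.range n.toNat).map (fun i => fVal n.toNat i) := by
    have hfold : ∀ (l : List Int), (∀ i ∈ l, 0 ≤ i) → ∀ (a : Array Int),
        (l.foldl (fun acc i => pvSet acc i i) a).toList
          = l.foldl (fun acc i => PySem.List.pySetD acc i i) a.toList := by
      intro l
      induction l with
      | nil => intro _ a; rfl
      | cons x l ih =>
        intro hmem a
        rw [List.foldl_cons, List.foldl_cons, ih (fun i hi => hmem i (List.mem_cons_of_mem x hi)),
          pvSet_toList a x x (hmem x List.mem_cons_self)]
    rw [pvSieve_toList n n.toNat 2 _ (by norm_num),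
      pvSet_toList _ 1 0 (by norm_num),
      hfold (PySem.List.pyRange 0 n 1)
        (fun i hi => (PySem.List.mem_pyRange_one.mp hi).1) (Array.replicate n.toNat 0),
      Array.toList_replicate, init_eq n hn, a3_eq n hn]
  rw [← Array.foldl_toList, foldl_pushA_toList]
  rw [PySem.List.foldl_congr_mem _ _
      (fun b i => if PySem.List.pyGetD ((List.range n.toNat).map (fun i => fVal n.toNat i)) i 0 ≠ 0
                  then b ++ [PySem.List.pyGetD ((List.range n.toNat).map (fun i => fVal n.toNat i)) i 0]
                  else b) _
      (by intro acc x hx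
          rw [hA3] at hx
          obtain ⟨i, -, rfl⟩ := List.mem_map.mp hx
          rw [pvGet_toList _ _ (fVal_nonneg n.toNat i), hA3]),
    show (#[] : Array Int).toList = [] from rfl, hA3, collect_eq n hn]
  -- B side
  rw [primesB_eq n hn]
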